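-- pv_equiv track=rewrite | github.com/HANASupervisor/statistic_study | EmploymenStudy/TaeYoung_Yoo/7_SamSungBus/11092_DistanceBetweenMaxAndMin.py | MaxMinusMin
-- ===== SOURCE A (Python) =====
-- def MaxMinusMin(arr):
--     # 최소값을 찾는다.
--     min_value = min(arr)
--     # 최소값과 같은 인덱스위치를 찾는다
--     for idx in range(len(arr)):
--         if arr[idx] == min_value:
--             min_idx = idx
--             break
--     # 최대값을 찾는다.
--     max_value = max(arr)
--     # 최대값과 같은 인덱스 위치를 찾는다.
--     for idx in range(len(arr)-1, -1, -1):
--         if arr[idx] == max_value: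
--             max_idx = idx
--             break
--     # 최대값 인덱스에서 최소값 인덱스 뺀다
--     return abs(max_idx - min_idx)
-- ===== SOURCE B (Python) =====
-- def MaxMinusMin(arr):
--     if not arr:
--         raise ValueError("MaxMinusMin() arg is an empty sequence")
--     it = iter(arr)
--     first = next(it)
--     min_value = max_value = first
--     min_idx = max_idx = 0
--     for i, x in enumerate(it, 1):
--         if x < min_value:
--             min_value, min_idx = x, i
--         if x >= max_value:
--             max_value, max_idx = x, i
--     return abs(max_idx - min_idx)
-- ===== Notes on version B (the rewrite author's own statement) =====
-- stated objective: simpler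
-- what changed: Replaces A's four passes (min, forward index scan, max, backward index scan) with a single fused loop over enumerate that maintains the first-minimum and last-maximum index pairs, preserving A's tie-breaking (strict < for min, >= for max).
-- outside the precondition, e.g. on MaxMinusMin([]): A raises ValueError, B raises ValueError
import Mathlib
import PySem

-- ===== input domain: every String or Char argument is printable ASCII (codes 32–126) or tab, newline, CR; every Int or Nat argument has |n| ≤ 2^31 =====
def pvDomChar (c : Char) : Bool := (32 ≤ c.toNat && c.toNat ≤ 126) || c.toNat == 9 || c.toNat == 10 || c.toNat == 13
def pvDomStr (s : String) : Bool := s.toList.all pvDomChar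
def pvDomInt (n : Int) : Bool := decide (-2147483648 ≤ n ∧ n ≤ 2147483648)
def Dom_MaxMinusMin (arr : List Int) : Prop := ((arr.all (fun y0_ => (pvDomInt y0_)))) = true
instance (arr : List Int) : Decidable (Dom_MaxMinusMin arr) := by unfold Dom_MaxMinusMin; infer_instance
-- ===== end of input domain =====

-- B replaces A's four passes with one fused loop keeping (first-min, last-max) index pairs; same return value.

-- ===== PORT A =====
-- 'for idx in range(len(arr)): if arr[idx] == min_value: min_idx = idx; break'
def pvFindFirst (v : Int) (i : Int) : List Int → Option Int
  | [] => none
  | x :: r => if x = v then some i else pvFindFirst v (i + 1) r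

-- 'for idx in range(len(arr)-1, -1, -1): if arr[idx] == max_value: max_idx = idx; break'
def pvFindLast (arr : List Int) (v : Int) : Nat → Option Int
  | 0 => none
  | n + 1 =>
    match PySem.List.pyGet? arr (n : Int) with
    | some x => if x = v then some (n : Int) else pvFindLast arr v n
    | none => none

def MaxMinusMin (arr : List Int) : Int :=
  match PySem.List.min? arr (fun y => y), PySem.List.max? arr (fun y => y) with
  | some mn, some mx =>
    match pvFindFirst mn 0 arr, pvFindLast arr mx arr.length with
    | some mi, some ma => |ma - mi|
    | _, _ => 0          -- unreachable: the min/max value always occurs in arr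
  | _, _ => 0            -- empty arr: Python raises ValueError (excluded by Pre_)

-- ===== PORT B =====
-- the single 'for i, x in enumerate(it, 1)' loop of Source B, state ((min_value, min_idx), (max_value, max_idx))
def pvLoopB (i : Int) (mn mx : Int × Int) : List Int → (Int × Int) × (Int × Int)
  | [] => (mn, mx)
  | x :: r =>
    pvLoopB (i + 1) (if x < mn.1 then (x, i) else mn) (if mx.1 ≤ x then (x, i) else mx) r

def MaxMinusMin_alt : List Int → Int
  | [] => 0              -- Python raises ValueError (excluded by Pre_)
  | x :: r =>
    let s := pvLoopB 1 (x, 0) (x, 0) r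
    |s.2.2 - s.1.2|

-- ===== PRECONDITION & SPEC =====
-- A ('min(arr)' of an empty sequence) raises ValueError on []; so does B.
def Pre_MaxMinusMin (arr : List Int) : Prop := arr ≠ []
instance (arr : List Int) : Decidable (Pre_MaxMinusMin arr) := by unfold Pre_MaxMinusMin; infer_instance
def pvWitness_MaxMinusMin : List Int := [3, 1, 4, 1, 5]

def Spec_MaxMinusMin (arr : List Int) (out : Int) : Prop := out = MaxMinusMin_alt arr
instance (arr : List Int) (out : Int) : Decidable (Spec_MaxMinusMin arr out) := by unfold Spec_MaxMinusMin; infer_instance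

-- ===== CLAIM (what is proved, stated in full; the proofs are below) =====
def Claim_equal_MaxMinusMin : Prop := ∀ (arr : List Int), Dom_MaxMinusMin arr → Pre_MaxMinusMin arr → Spec_MaxMinusMin arr (MaxMinusMin arr)

-- ===== LEMMAS AND PROOFS =====

-- (m, j) is B's min-state after scanning l: m sits at index j, everything before it is > m, everything at/after is ≥ m
def MinDecomp (l : List Int) (m j : Int) : Prop :=
  ∃ q t, l = q ++ m :: t ∧ j = (q.length : Int) ∧ (∀ y ∈ q, m < y) ∧ (∀ y ∈ t, m ≤ y)

def MaxDecomp (l : List Int) (m j : Int) : Prop :=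
  ∃ q t, l = q ++ m :: t ∧ j = (q.length : Int) ∧ (∀ y ∈ q, y ≤ m) ∧ (∀ y ∈ t, y < m)

lemma pvLoopB_inv (r : List Int) :
    ∀ (P : List Int) (mn mx : Int × Int), MinDecomp P mn.1 mn.2 → MaxDecomp P mx.1 mx.2 →
      MinDecomp (P ++ r) (pvLoopB (P.length : Int) mn mx r).1.1 (pvLoopB (P.length : Int) mn mx r).1.2 ∧
      MaxDecomp (P ++ r) (pvLoopB (P.length : Int) mn mx r).2.1 (pvLoopB (P.length : Int) mn mx r).2.2 := by
  induction r with
  | nil =>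
    intro P mn mx h1 h2
    simpa [pvLoopB] using ⟨h1, h2⟩
  | cons x r ih =>
    intro P mn mx h1 h2
    have h1' : MinDecomp (P ++ [x]) (if x < mn.1 then (x, (P.length : Int)) else mn).1
        (if x < mn.1 then (x, (P.length : Int)) else mn).2 := by
      obtain ⟨q, t, hP, hj, hq, ht⟩ := h1
      by_cases hx : x < mn.1
      · rw [if_pos hx]
        refine ⟨P, [], by simp, by simp, ?_, by simp⟩
        intro y hy
        rw [hP] at hy
        rcases List.mem_append.1 hy with hy | hy
        · exact lt_trans hx (hq y hy)
        · rcases List.mem_cons.1 hy with rfl | hy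
          · exact hx
          · exact lt_of_lt_of_le hx (ht y hy)
      · rw [if_neg hx]
        refine ⟨q, t ++ [x], by simp [hP], hj, hq, ?_⟩
        intro y hy
        rcases List.mem_append.1 hy with hy | hy
        · exact ht y hy
        · simp at hy; subst hy; omega
    have h2' : MaxDecomp (P ++ [x]) (if mx.1 ≤ x then (x, (P.length : Int)) else mx).1
        (if mx.1 ≤ x then (x, (P.length : Int)) else mx).2 := by
      obtain ⟨q, t, hP, hj, hq, ht⟩ := h2
      by_cases hx : mx.1 ≤ x
      · rw [if_pos hx]
        refine ⟨P, [], by simp, by simp, ?_, by simp⟩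
        intro y hy
        rw [hP] at hy
        rcases List.mem_append.1 hy with hy | hy
        · exact le_trans (hq y hy) hx
        · rcases List.mem_cons.1 hy with rfl | hy
          · exact hx
          · exact le_trans (le_of_lt (ht y hy)) hx
      · rw [if_neg hx]
        refine ⟨q, t ++ [x], by simp [hP], hj, hq, ?_⟩
        intro y hy
        rcases List.mem_append.1 hy with hy | hy
        · exact ht y hy
        · simp at hy; subst hy; omega
    have h := ih (P ++ [x]) _ _ h1' h2'
    have hlen : ((P ++ [x]).length : Int) = (P.length : Int) + 1 := by simp
    rw [hlen] at h
    simpa [pvLoopB, List.append_assoc] using h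

lemma min?_of_decomp {l : List Int} {m j : Int} (h : MinDecomp l m j) :
    PySem.List.min? l (fun y => y) = some m := by
  obtain ⟨q, t, hP, -, hq, ht⟩ := h
  have hm : m ∈ l := by simp [hP]
  have hlb : ∀ y ∈ l, m ≤ y := by
    intro y hy
    rw [hP] at hy
    rcases List.mem_append.1 hy with hy | hy
    · exact le_of_lt (hq y hy)
    · rcases List.mem_cons.1 hy with rfl | hy
      · exact le_refl _
      · exact ht y hy
  cases hmin : PySem.List.min? l (fun y => y) with
  | none =>
    rw [PySem.List.min?_eq_none_iff] at hmin
    subst hmin; simp at hm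
  | some m0 =>
    have h1 : m0 ∈ l := PySem.List.min?_mem hmin
    have h2 := PySem.List.min?_isMin hmin m hm
    have h3 := hlb m0 h1
    simp only [Option.some.injEq]
    omega

lemma max?_of_decomp {l : List Int} {m j : Int} (h : MaxDecomp l m j) :
    PySem.List.max? l (fun y => y) = some m := by
  obtain ⟨q, t, hP, -, hq, ht⟩ := h
  have hm : m ∈ l := by simp [hP]
  have hub : ∀ y ∈ l, y ≤ m := by
    intro y hy
    rw [hP] at hy
    rcases List.mem_append.1 hy with hy | hy
    · exact hq y hy
    · rcases List.mem_cons.1 hy with rfl | hy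
      · exact le_refl _
      · exact le_of_lt (ht y hy)
  cases hmax : PySem.List.max? l (fun y => y) with
  | none =>
    rw [PySem.List.max?_eq_none_iff] at hmax
    subst hmax; simp at hm
  | some m0 =>
    have h1 : m0 ∈ l := PySem.List.max?_mem hmax
    have h2 := PySem.List.max?_isMax hmax m hm
    have h3 := hub m0 h1
    simp only [Option.some.injEq]
    omega

lemma findFirst_aux (q : List Int) : ∀ (i m : Int) (t : List Int), (∀ y ∈ q, m < y) →
    pvFindFirst m i (q ++ m :: t) = some (i + (q.length : Int)) := by
  induction q with
  | nil => intro i m t _; simp [pvFindFirst]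
  | cons a q ih =>
    intro i m t hq
    have ha : m < a := hq a (by simp)
    have hne : ¬ (a = m) := by omega
    simp only [List.cons_append, pvFindFirst, if_neg hne]
    rw [ih (i + 1) m t (fun y hy => hq y (by simp [hy]))]
    congr 1
    simp
    omega

lemma findFirst_of_decomp {l : List Int} {m j : Int} (h : MinDecomp l m j) :
    pvFindFirst m 0 l = some j := by
  obtain ⟨q, t, hP, hj, hq, -⟩ := h
  rw [hP, findFirst_aux q 0 m t hq, hj]
  congr 1
  omega

lemma findLast_trunc (v y : Int) : ∀ (n : Nat) (l : List Int), n ≤ l.length →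
    pvFindLast (l ++ [y]) v n = pvFindLast l v n := by
  intro n
  induction n with
  | zero => intro l _; simp [pvFindLast]
  | succ n ih =>
    intro l hn
    have hget : PySem.List.pyGet? (l ++ [y]) ((n : Nat) : Int) = PySem.List.pyGet? l ((n : Nat) : Int) := by
      rw [PySem.List.pyGet?_natCast, PySem.List.pyGet?_natCast,
        List.getElem?_append_left (by omega)]
    simp only [pvFindLast, hget, ih l (by omega)]

lemma findLast_aux (v : Int) (t : List Int) : ∀ (q : List Int), (∀ y ∈ t, y < v) →
    pvFindLast (q ++ v :: t) v (q.length + 1 + t.length) = some (q.length : Int) := by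
  induction t using List.reverseRecOn with
  | nil =>
    intro q _
    show pvFindLast (q ++ [v]) v (q.length + 1 + 0) = some (q.length : Int)
    rw [show q.length + 1 + 0 = q.length + 1 from rfl]
    simp [pvFindLast]
  | append_singleton t y ih =>
    intro q hty
    have hy : y < v := hty y (by simp)
    have hne : ¬ (y = v) := by omega
    have hsplit : q ++ v :: (t ++ [y]) = (q ++ v :: t) ++ [y] := by simp
    have hlen : q.length + 1 + (t ++ [y]).length = (q.length + 1 + t.length) + 1 := by
      simp; omega
    have hn : ((q ++ v :: t).length : Nat) = q.length + 1 + t.length := by simp; omega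
    have hget : PySem.List.pyGet? ((q ++ v :: t) ++ [y]) (((q.length + 1 + t.length : Nat)) : Int) = some y := by
      rw [PySem.List.pyGet?_natCast, ← hn]
      simp
    rw [hsplit, hlen]
    simp only [pvFindLast, hget, if_neg hne]
    rw [findLast_trunc v y (q.length + 1 + t.length) (q ++ v :: t) (by omega)]
    exact ih q (fun z hz => hty z (by simp [hz]))

lemma findLast_of_decomp {l : List Int} {m j : Int} (h : MaxDecomp l m j) :
    pvFindLast l m l.length = some j := by
  obtain ⟨q, t, hP, hj, -, ht⟩ := h
  subst hP
  have hlen : (q ++ m :: t).length = q.length + 1 + t.length := by simp; omega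
  rw [hlen, findLast_aux m t q ht, hj]

-- ===== VERDICT (by name: the statement is the Claim_ definition above) =====
theorem MaxMinusMin_spec : Claim_equal_MaxMinusMin := by
  intro arr _ hpre
  unfold Spec_MaxMinusMin
  match arr, hpre with
  | x :: r, _ =>
    have h := pvLoopB_inv r [x] (x, 0) (x, 0)
      ⟨[], [], rfl, rfl, by simp, by simp⟩ ⟨[], [], rfl, rfl, by simp, by simp⟩
    norm_num at h
    obtain ⟨hmin, hmax⟩ := h
    simp only [MaxMinusMin, MaxMinusMin_alt, min?_of_decomp hmin, max?_of_decomp hmax,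
      findFirst_of_decomp hmin, findLast_of_decomp hmax]
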